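-- pv_equiv track=rewrite | github.com/zmcgrath96/hypedsearch | src/identfication/filtering.py | overlap_assembler
-- ===== SOURCE A (Python) =====
-- from collections import defaultdict
-- from operator import itemgetter
--
-- def overlap_assembler(l: list, ion: str) -> str:
--     '''
--     Take a list of sequences and return the longest sequence that contains
--     the most of the rest of the sequences.
--
--     Example:
--         l: [ABCDEFG, ABCDE, ABCXY, ABCD, ABC]
--
--         ABCDEFG contains [ABCDE, ABCD, ABC] which is the most of any others
--         so ABCDEFG would be returned
--
--     Inputs:
--         l:      (list) the sequences to assemble together
--         ion:    (str) the ion this is performed for. y goes right to left, b left to right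
--     Outputs:
--         (str) the sequence that contains the most of the others. If no
--                 sequence can be assembled, None is returned
--     '''
--     # sort longest to shortest
--     l.sort(key=len, reverse=True)
--
--     # got through each element and count the number of smaller
--     # sequences it contains
--     assembler = defaultdict(lambda: 0)
--     for i, e in enumerate(l[:-1]):
--         for e2 in l[i+1:]:
--
--             # get left to right or right to left depending on the ion
--             cmp_str = e[:len(e2)] if ion == 'b' else e[-len(e2):]
--
--             if e2 == cmp_str:
--                 assembler[e] += 1
--
--     # return the str if possible, None otherwise
--     try:
--         max_count = max([(k, v) for k, v in assembler.items()], key=itemgetter(1))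
--         return max_count[0] if max_count[1] > 1 else None
--     except:
--         return None
-- ===== SOURCE B (Python) =====
-- def overlap_assembler(l: list, ion: str) -> str:
--     # same observable in-place sort as the original
--     l.sort(key=len, reverse=True)
--
--     # multiplicity of each sequence
--     cnt = {}
--     for s in l:
--         cnt[s] = cnt.get(s, 0) + 1
--
--     # For each distinct sequence s (in sorted order), the number of pairs the
--     # original counts for s is m*p + m*(m-1)//2 where m = multiplicity of s and
--     # p = number of strictly shorter elements contained in s (prefixes for 'b',
--     # non-empty suffixes otherwise), counted with multiplicity via cnt lookups.
--     best = None  # (count, sequence); strict '>' keeps the earliest max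
--     seen = set()
--     for s in l:
--         if s in seen:
--             continue
--         seen.add(s)
--         m = cnt[s]
--         if ion == 'b':
--             p = sum(cnt.get(s[:d], 0) for d in range(len(s)))
--         else:
--             p = sum(cnt.get(s[d:], 0) for d in range(1, len(s)))
--         c = m * p + m * (m - 1) // 2
--         if best is None or c > best[0]:
--             best = (c, s)
--     return best[1] if best is not None and best[0] > 1 else None
-- ===== Notes on version B (the rewrite author's own statement) =====
-- stated objective: faster
-- what changed: Replaces the O(n^2) all-pairs containment scan with a Counter-based formula: each distinct sequence's score is multiplicity*(count of its shorter contained prefixes/suffixes, summed via dictionary lookups of its own slices) plus duplicate pairs, picked up in one first-strict-max pass.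
import Mathlib
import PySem

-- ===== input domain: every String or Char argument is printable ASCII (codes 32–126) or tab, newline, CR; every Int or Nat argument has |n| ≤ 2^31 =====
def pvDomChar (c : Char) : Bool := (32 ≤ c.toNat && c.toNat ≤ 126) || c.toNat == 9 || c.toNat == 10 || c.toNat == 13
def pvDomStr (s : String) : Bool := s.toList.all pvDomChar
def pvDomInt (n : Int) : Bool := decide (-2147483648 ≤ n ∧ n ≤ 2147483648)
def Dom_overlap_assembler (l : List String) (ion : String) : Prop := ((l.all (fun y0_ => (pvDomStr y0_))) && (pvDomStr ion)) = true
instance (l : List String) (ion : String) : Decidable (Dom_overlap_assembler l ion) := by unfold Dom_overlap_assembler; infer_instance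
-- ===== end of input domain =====

-- B replaces A's quadratic pairwise scan by a counting formula per distinct sequence
-- (multiplicity * contained-shorter-count + duplicate pairs) read off a Counter; same
-- return value everywhere (both also sort l in place / return-value equivalence proved).


-- ===== PORT A =====
-- cmp_str = e[:len(e2)] if ion == 'b' else e[-len(e2):]; match = (e2 == cmp_str)
def pvMatch (ion : String) (e e2 : String) : Bool :=
  let cmp := if ion == "b" then PySem.Str.slice e none (some (PySem.Str.len e2))
             else PySem.Str.slice e (some (-(PySem.Str.len e2))) none
  e2 == cmp

-- inner loop: for e2 in l[i+1:]: if e2 == cmp_str: assembler[e] += 1   (defaultdict 0)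
def pvInner (ion : String) (e : String) (rest : List String)
    (d : PySem.Dict String Int) : PySem.Dict String Int :=
  rest.foldl (fun d e2 => if pvMatch ion e e2 then d.insert e (d.getD e 0 + 1) else d) d

-- outer loop 'for i, e in enumerate(l[:-1]): for e2 in l[i+1:] …' as the structural
-- recursion over the sorted list; the extra step for the last element folds over an
-- empty tail and is a no-op, exactly like excluding it with l[:-1]
def pvPairs (ion : String) : List String → PySem.Dict String Int → PySem.Dict String Int
  | [], d => d
  | e :: rest, d => pvPairs ion rest (pvInner ion e rest d)

def overlap_assembler (l : List String) (ion : String) : Option String :=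
  -- l.sort(key=len, reverse=True)  (in-place in Python; return value modelled here)
  let L := PySem.List.sorted l (fun s => PySem.Str.len s) true
  let assembler := pvPairs ion L PySem.Dict.empty
  -- max([(k, v) for k, v in assembler.items()], key=itemgetter(1)); ValueError → None
  match PySem.List.max? assembler.items (fun p => p.2) with
  | none => none
  | some kv => if kv.2 > 1 then some kv.1 else none

-- ===== PORT B =====
-- count for a distinct sequence s: m * p + m*(m-1)//2  (see Source B)
def pvCountB (ion : String) (cnt : PySem.Dict String Int) (s : String) : Int :=
  let m := cnt.getD s 0
  let p := if ion == "b" then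
      ((PySem.List.pyRange 0 (PySem.Str.len s) 1).map
        (fun d => cnt.getD (PySem.Str.slice s none (some d)) 0)).sum
    else
      ((PySem.List.pyRange 1 (PySem.Str.len s) 1).map
        (fun d => cnt.getD (PySem.Str.slice s (some d) none) 0)).sum
  m * p + PySem.Int.floordiv (m * (m - 1)) 2

def overlap_assembler_alt (l : List String) (ion : String) : Option String :=
  -- l.sort(key=len, reverse=True)
  let L := PySem.List.sorted l (fun s => PySem.Str.len s) true
  -- cnt[s] = cnt.get(s, 0) + 1
  let cnt := L.foldl (fun d s => d.insert s (d.getD s 0 + 1)) PySem.Dict.empty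
  -- one pass over L skipping seen, keeping the first strict maximum
  let r := L.foldl (fun (st : PySem.Set String × Option (Int × String)) s =>
      if PySem.Set.contains st.1 s then st
      else (PySem.Set.add st.1 s,
        match st.2 with
        | none => some (pvCountB ion cnt s, s)
        | some b => if b.1 < pvCountB ion cnt s then some (pvCountB ion cnt s, s) else some b))
    (PySem.Set.empty, none)
  match r.2 with
  | none => none
  | some b => if 1 < b.1 then some b.2 else none

-- ===== PRECONDITION & SPEC =====
def Spec_overlap_assembler (l : List String) (ion : String) (out : Option String) : Prop := out = overlap_assembler_alt l ion
instance (l : List String) (ion : String) (out : Option String) : Decidable (Spec_overlap_assembler l ion out) := by unfold Spec_overlap_assembler; infer_instance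

-- ===== CLAIM (what is proved, stated in full; the proofs are below) =====
def Claim_equal_overlap_assembler : Prop := ∀ (l : List String) (ion : String), Dom_overlap_assembler l ion → Spec_overlap_assembler l ion (overlap_assembler l ion)

-- ===== LEMMAS AND PROOFS =====

-- value A accumulates for key s over the (sorted) list
def pvCountA (ion : String) : List String → String → Int
  | [], _ => 0
  | e :: rest, s =>
    (if s = e then ((rest.countP (fun t => pvMatch ion e t)) : Int) else 0) + pvCountA ion rest s

-- key order of A's dict, given the keys already present
def pvKeysA (ion : String) : List String → List String → List String
  | [], _ => []
  | e :: rest, ks =>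
    if 0 < rest.countP (fun t => pvMatch ion e t) ∧ e ∉ ks
    then e :: pvKeysA ion rest (ks ++ [e])
    else pvKeysA ion rest ks

-- "t is strictly shorter than s and matched by it"
def pvSM (ion : String) (s t : String) : Bool :=
  pvMatch ion s t && decide (t.length < s.length)

def pvTri : Nat → Int
  | 0 => 0
  | m + 1 => pvTri m + m

theorem pvMatch_b (ion e t : String) (h : (ion == "b") = true) :
    pvMatch ion e t = decide (t.toList = e.toList.take t.length) := by
  simp [pvMatch, h, PySem.Str.slice, PySem.Str.len, Bool.beq_eq_decide_eq, String.ext_iff,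
    PySem.Chars.slice_eq_listSlice, PySem.List.slice_to_natCast, String.toList_ofList]

theorem pvMatch_y_pos (ion e t : String) (h : (ion == "b") = false) (hk : 0 < t.length) :
    pvMatch ion e t = decide (t.toList = e.toList.drop (e.length - t.length)) := by
  simp only [pvMatch, h, Bool.false_eq_true, if_false, PySem.Str.slice, PySem.Str.len,
    PySem.Chars.slice_eq_listSlice, String.length_toList,
    PySem.List.slice_from_neg_natCast e.toList t.length hk, Bool.beq_eq_decide_eq,
    String.ext_iff, String.toList_ofList]

theorem pvMatch_y_nil (ion e t : String) (h : (ion == "b") = false) (hk : t.length = 0) :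
    pvMatch ion e t = (t == e) := by
  have h0 : -(PySem.Str.len t) = (0 : Int) := by simp [PySem.Str.len, hk]
  simp only [pvMatch, h, Bool.false_eq_true, if_false, h0, PySem.Str.slice,
    PySem.Chars.slice_eq_listSlice]
  rw [show ((0:Int) = ((0:Nat):Int)) from rfl, PySem.List.slice_from_natCast]
  simp [Bool.beq_eq_decide_eq, String.ext_iff]

theorem pvMatch_self (ion : String) (e : String) : pvMatch ion e e = true := by
  cases hb : (ion == "b") with
  | true => simp [pvMatch_b _ _ _ hb]
  | false =>
    rcases Nat.eq_zero_or_pos e.length with hk | hk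
    · simp [pvMatch_y_nil _ _ _ hb hk]
    · simp [pvMatch_y_pos _ _ _ hb hk]

theorem pvMatch_eq_len (ion : String) (e t : String)
    (h : t.length = e.length) : pvMatch ion e t = (t == e) := by
  cases hb : (ion == "b") with
  | true =>
    rw [pvMatch_b _ _ _ hb, h, Bool.beq_eq_decide_eq]
    simp only [decide_eq_decide, String.ext_iff]
    rw [show e.length = e.toList.length by simp, List.take_length]
  | false =>
    rcases Nat.eq_zero_or_pos t.length with hk | hk
    · rw [pvMatch_y_nil _ _ _ hb hk]
    · rw [pvMatch_y_pos _ _ _ hb hk, h, Bool.beq_eq_decide_eq]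
      simp only [decide_eq_decide, String.ext_iff, Nat.sub_self]
      rw [List.drop_zero]

theorem pvInner_eq (ion e : String) (rest : List String) (d : PySem.Dict String Int) :
    pvInner ion e rest d =
      ((rest.filter (fun t => pvMatch ion e t)).map (fun _ => e)).foldl
        (fun d x => d.insert x (d.getD x 0 + 1)) d := by
  rw [pvInner, PySem.List.foldl_if_eq_foldl_filter, List.foldl_map]

theorem pvInner_getD (ion e : String) (rest : List String) (d : PySem.Dict String Int) (s : String) :
    (pvInner ion e rest d).getD s 0 =
      d.getD s 0 + if s = e then ((rest.countP (fun t => pvMatch ion e t)) : Int) else 0 := by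
  rw [pvInner_eq, PySem.Dict.getD_foldl_insert_add_one]
  congr 1
  rw [List.map_const']
  simp [List.count_replicate, List.countP_eq_length_filter]
  split <;> simp_all [eq_comm]

theorem pvUpdate_replicate_mem (x : String) : ∀ (n : Nat) (s : PySem.Set String), x ∈ s →
    PySem.Set.update s (List.replicate n x) = s := by
  intro n
  induction n with
  | zero => intro s _; rfl
  | succ m ih =>
    intro s hx
    rw [List.replicate_succ, PySem.Set.update_cons, PySem.Set.add_of_mem hx]
    exact ih s hx

theorem pvUpdate_replicate (n : Nat) (s : PySem.Set String) (x : String) :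
    PySem.Set.update s (List.replicate n x) = if n = 0 then s else PySem.Set.add s x := by
  cases n with
  | zero => rfl
  | succ m =>
    rw [List.replicate_succ, PySem.Set.update_cons, if_neg (Nat.succ_ne_zero m)]
    exact pvUpdate_replicate_mem x m _ (by rw [PySem.Set.mem_add]; right; rfl)

theorem pvInner_keys (ion e : String) (rest : List String) (d : PySem.Dict String Int) :
    (pvInner ion e rest d).keys =
      if 0 < rest.countP (fun t => pvMatch ion e t)
      then PySem.Set.add d.keys e else d.keys := by
  rw [pvInner_eq, PySem.Dict.keys_foldl_insert, List.map_const', List.countP_eq_length_filter]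
  rw [← List.countP_eq_length_filter]
  generalize rest.countP (fun t => pvMatch ion e t) = n
  rw [pvUpdate_replicate]
  rcases Nat.eq_zero_or_pos n with hn | hn
  · simp [hn]
  · rw [if_neg (by omega), if_pos hn]

theorem pvCountA_nonneg (ion : String) (L : List String) (s : String) :
    0 ≤ pvCountA ion L s := by
  induction L with
  | nil => simp [pvCountA]
  | cons e rest ih =>
    rw [pvCountA]
    have : (0:Int) ≤ if s = e then ((rest.countP (fun t => pvMatch ion e t)) : Int) else 0 := by
      split <;> simp
    omega

theorem pvCountA_of_not_mem (ion : String) (L : List String) (s : String)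
    (h : s ∉ L) : pvCountA ion L s = 0 := by
  induction L with
  | nil => rfl
  | cons e rest ih =>
    simp only [List.mem_cons, not_or] at h
    rw [pvCountA, if_neg h.1, ih h.2, zero_add]

theorem pvPairs_getD (ion : String) (L : List String) : ∀ (d : PySem.Dict String Int) (s : String),
    (pvPairs ion L d).getD s 0 = d.getD s 0 + pvCountA ion L s := by
  induction L with
  | nil => intro d s; simp [pvPairs, pvCountA]
  | cons e rest ih =>
    intro d s
    rw [pvPairs, ih, pvInner_getD, pvCountA]
    omega

theorem pvPairs_keys (ion : String) (L : List String) : ∀ (d : PySem.Dict String Int),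
    (pvPairs ion L d).keys = d.keys ++ pvKeysA ion L d.keys := by
  induction L with
  | nil => intro d; simp [pvPairs, pvKeysA]
  | cons e rest ih =>
    intro d
    rw [pvPairs, ih, pvInner_keys, pvKeysA]
    by_cases hc : 0 < rest.countP (fun t => pvMatch ion e t)
    · rw [if_pos hc, PySem.Set.add_eq_ite]
      by_cases hm : e ∈ d.keys
      · rw [if_pos hm, if_neg (by simp [hm, hc])]
      · rw [if_neg hm, if_pos ⟨hc, hm⟩]
        simp
    · rw [if_neg hc, if_neg (by simp [hc])]

theorem pvPairs_nodup_keys (ion : String) (L : List String) : ∀ (d : PySem.Dict String Int),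
    d.keys.Nodup → (pvPairs ion L d).keys.Nodup := by
  induction L with
  | nil => intro d h; exact h
  | cons e rest ih =>
    intro d h
    refine ih _ ?_
    rw [pvInner_eq]
    exact PySem.Dict.nodup_keys_foldl_insert _ _ _ h

theorem pvMatch_countP_pos (ion e : String) (rest : List String) (h : e ∈ rest) :
    0 < rest.countP (fun t => pvMatch ion e t) :=
  List.countP_pos_iff.mpr ⟨e, h, pvMatch_self ion e⟩

theorem pvKeysA_eq (ion : String) (L : List String) : ∀ (ks : List String),
    pvKeysA ion L ks =
      (PySem.Set.ofList L).filter
        (fun s => decide (s ∉ ks) && decide (0 < pvCountA ion L s)) := by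
  induction L with
  | nil => intro ks; rfl
  | cons e rest ih =>
    intro ks
    rw [pvKeysA, PySem.Set.ofList_cons, List.filter_cons]
    have hdisc : ∀ (P : String → Bool), (PySem.Set.discard (PySem.Set.ofList rest) e).filter P
        = (PySem.Set.ofList rest).filter (fun s => P s && decide (s ≠ e)) := by
      intro P
      rw [PySem.Set.discard, List.filter_filter]
      exact List.filter_congr (fun x _ => by by_cases hx : x = e <;> simp [hx])
    have hCA : ∀ s, s ≠ e → pvCountA ion (e :: rest) s = pvCountA ion rest s := by
      intro s hs; rw [pvCountA, if_neg hs, zero_add]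
    by_cases hc : 0 < rest.countP (fun t => pvMatch ion e t)
    · by_cases hm : e ∈ ks
      · rw [if_neg (by simp [hm]), ih ks]
        rw [if_neg (by simp [hm]), hdisc]
        refine (List.filter_congr fun s _ => ?_).symm
        by_cases hs : s = e
        · subst hs; simp [hm]
        · simp [hs, hCA s hs]
      · rw [if_pos ⟨hc, hm⟩, ih (ks ++ [e])]
        have hce : 0 < pvCountA ion (e :: rest) e := by
          rw [pvCountA, if_pos rfl]
          have := pvCountA_nonneg ion rest e
          omega
        rw [if_pos (by simp [hm, hce])]
        congr 1
        rw [hdisc]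
        refine (List.filter_congr fun s _ => ?_).symm
        by_cases hs : s = e
        · subst hs; simp
        · simp [hs, hCA s hs, List.mem_append]
    · -- e has no later match: e ∉ rest, pvCountA (e::rest) e = 0
      have hem : e ∉ rest := fun h => hc (pvMatch_countP_pos ion e rest h)
      rw [if_neg (by simp [hc]), ih ks]
      have hce : pvCountA ion (e :: rest) e = 0 := by
        rw [pvCountA, if_pos rfl, pvCountA_of_not_mem ion rest e hem]
        omega
      rw [if_neg (by simp [hce])]
      rw [hdisc]
      refine (List.filter_congr fun s hsmem => ?_).symm
      have hs : s ≠ e := by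
        rintro rfl
        exact hem (by simpa [PySem.Set.mem_ofList] using hsmem)
      simp [hs, hCA s hs]

theorem pvCountP_or_disjoint (p q : String → Bool) : ∀ (l : List String),
    (∀ x ∈ l, ¬(p x = true ∧ q x = true)) →
    l.countP (fun x => p x || q x) = l.countP p + l.countP q := by
  intro l
  induction l with
  | nil => intro _; rfl
  | cons a l ih =>
    intro h
    rw [List.countP_cons, List.countP_cons, List.countP_cons,
      ih (fun x hx => h x (List.mem_cons_of_mem a hx))]
    have := h a (List.mem_cons_self)
    by_cases hp : p a = true <;> by_cases hq : q a = true <;> simp [hp, hq] at this ⊢ <;> omega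

theorem pvMatch_split (ion s : String) (rest : List String)
    (hlen : ∀ t ∈ rest, t.length ≤ s.length) :
    rest.countP (fun t => pvMatch ion s t) = rest.count s + rest.countP (pvSM ion s) := by
  have h1 : rest.countP (fun t => pvMatch ion s t)
      = rest.countP (fun t => (t == s) || pvSM ion s t) := by
    refine List.countP_congr (fun t ht => ?_)
    have hle := hlen t ht
    rcases Nat.lt_or_ge t.length s.length with hlt | hge
    · have hne : (t == s) = false := by
        simp only [beq_eq_false_iff_ne]; rintro rfl; omega
      simp [pvSM, hne, hlt]
    · have heq : t.length = s.length := by omega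
      rw [pvMatch_eq_len ion s t heq]
      simp [pvSM, heq]
  rw [h1, pvCountP_or_disjoint]
  · rw [List.count]
  · intro t _ ⟨h1, h2⟩
    simp only [beq_iff_eq] at h1
    subst h1
    simp [pvSM] at h2
theorem pvCountA_formula (ion : String) (L : List String)
    (h : L.Pairwise (fun a b => b.length ≤ a.length)) (s : String) :
    pvCountA ion L s =
      (L.count s : Int) * (L.countP (pvSM ion s) : Int) + pvTri (L.count s) := by
  induction L with
  | nil => simp [pvCountA, pvTri]
  | cons e rest ih =>
    rw [List.pairwise_cons] at h
    obtain ⟨hlen, hp⟩ := h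
    rw [pvCountA, ih hp]
    by_cases hs : s = e
    · subst hs
      have hsm : pvSM ion s s = false := by simp [pvSM]
      rw [if_pos rfl, pvMatch_split ion s rest hlen, List.count_cons_self,
        List.countP_cons_of_neg (by simp [hsm])]
      have htri : pvTri (rest.count s + 1) = pvTri (rest.count s) + rest.count s := rfl
      rw [htri]
      push_cast
      ring
    · rw [if_neg hs, zero_add]
      have hb : (e == s) = false := beq_eq_false_iff_ne.mpr (Ne.symm hs)
      have hcc : List.count s (e :: rest) = List.count s rest := by
        rw [List.count_cons, hb]; rfl
      rcases Nat.eq_zero_or_pos (rest.count s) with h0 | h0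
      · rw [hcc, h0]
        simp [pvTri]
      · have hsmem : s ∈ rest := List.count_pos_iff.mp h0
        have hse : pvSM ion s e = false := by
          have := hlen s hsmem
          simp [pvSM]; omega
        rw [hcc, List.countP_cons_of_neg (by simp [hse])]

theorem pvTri_floordiv (m : Nat) :
    PySem.Int.floordiv ((m : Int) * ((m : Int) - 1)) 2 = pvTri m := by
  induction m with
  | zero =>
    rw [PySem.Int.floordiv_eq_ediv_of_pos (by omega)]
    simp [pvTri]
  | succ k ih =>
    have h1 : ((k+1 : Nat) : Int) * (((k+1 : Nat) : Int) - 1)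
        = (k : Int) * ((k : Int) - 1) + (k : Int) * 2 := by push_cast; ring
    rw [h1, PySem.Int.floordiv_eq_ediv_of_pos (by omega),
      Int.add_mul_ediv_right _ _ (by omega : (2:Int) ≠ 0),
      ← PySem.Int.floordiv_eq_ediv_of_pos (by omega), ih]
    rfl

theorem pvSum_counts (F : Nat → String) (n : Nat) (G : String → Bool)
    (huniq : ∀ t, ((List.range n).countP (fun k => t = F k)) = if G t then 1 else 0) :
    ∀ L : List String, ((List.range n).map (fun k => (L.count (F k) : Int))).sum
      = (L.countP G : Int) := by
  intro L
  induction L with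
  | nil => simp
  | cons t L' ih =>
    have hsplit : ∀ k, ((t :: L').count (F k) : Int)
        = (L'.count (F k) : Int) + (if t = F k then 1 else 0) := by
      intro k
      rw [List.count_cons]
      by_cases h : t = F k
      · rw [if_pos (by simp [h]), if_pos h]; push_cast; ring
      · rw [if_neg (by simp [h]), if_neg h]; push_cast; ring
    calc ((List.range n).map (fun k => ((t :: L').count (F k) : Int))).sum
        = ((List.range n).map (fun k => (L'.count (F k) : Int) + (if t = F k then 1 else 0))).sum := by
          exact congrArg _ (List.map_congr_left (fun k _ => hsplit k))
      _ = ((List.range n).map (fun k => (L'.count (F k) : Int))).sum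
          + ((List.range n).map (fun k => (if t = F k then (1:Int) else 0))).sum := by
          rw [← List.sum_map_add]
      _ = (L'.countP G : Int) + (if G t then 1 else 0) := by
          rw [ih]
          congr 1
          have hdec : (fun k => if t = F k then (1:Int) else 0)
              = fun k => if (decide (t = F k)) = true then (1:Int) else 0 := by
            funext k; simp
          rw [hdec, PySem.List.sum_map_ite_one_zero, huniq t]
          split <;> simp
      _ = ((t :: L').countP G : Int) := by
          rw [List.countP_cons]
          split <;> simp

theorem pvH1 (cs ts : List Char) : ∀ n : Nat, n ≤ cs.length →
    (List.range n).countP (fun k => decide (ts = cs.take k))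
      = if ts = cs.take ts.length ∧ ts.length < n then 1 else 0 := by
  intro n
  induction n with
  | zero => intro _; simp
  | succ m ih =>
    intro h
    rw [List.range_succ, List.countP_append, ih (by omega)]
    by_cases hp : ts = cs.take m
    · have hlen : ts.length = m := by rw [hp, List.length_take]; omega
      rw [if_neg (by omega), if_pos ⟨by rw [hlen]; exact hp, by omega⟩]
      simp [hp]
    · rw [List.countP_singleton]
      have hd : (if decide (ts = cs.take m) = true then (1:Nat) else 0) = 0 := by simp [hp]
      rw [hd, Nat.add_zero]
      have hiff : (ts = cs.take ts.length ∧ ts.length < m + 1)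
          ↔ (ts = cs.take ts.length ∧ ts.length < m) := by
        constructor
        · rintro ⟨a, b⟩
          refine ⟨a, ?_⟩
          rcases Nat.lt_or_ge ts.length m with hlt | hge
          · exact hlt
          · exfalso
            have hm : ts.length = m := by omega
            exact hp (by rw [← hm]; exact a)
        · rintro ⟨a, b⟩; exact ⟨a, by omega⟩
      simp only [hiff]

theorem pvH2 (cs ts : List Char) : ∀ m : Nat, m ≤ cs.length - 1 →
    (List.range m).countP (fun k => decide (ts = cs.drop (1 + k)))
      = if ts = cs.drop (cs.length - ts.length) ∧ ts.length < cs.length ∧ cs.length ≤ ts.length + m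
        then 1 else 0 := by
  intro m
  induction m with
  | zero => intro _; rw [if_neg (by omega)]; simp
  | succ m ih =>
    intro h
    rw [List.range_succ, List.countP_append, ih (by omega), List.countP_singleton]
    by_cases hp : ts = cs.drop (1 + m)
    · have hlen : ts.length = cs.length - (1 + m) := by rw [hp, List.length_drop]
      have hm : 1 + m < cs.length := by omega
      rw [if_neg (by omega)]
      have hd : (if decide (ts = cs.drop (1 + m)) = true then (1:Nat) else 0) = 1 := by simp [hp]
      rw [hd, if_pos ⟨by rw [show cs.length - ts.length = 1 + m by omega]; exact hp, by omega, by omega⟩]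
    · have h1 : decide (ts = cs.drop (1 + m)) = false := by simpa using hp
      have hiff : (ts = cs.drop (cs.length - ts.length) ∧ ts.length < cs.length ∧ cs.length ≤ ts.length + (m+1))
          ↔ (ts = cs.drop (cs.length - ts.length) ∧ ts.length < cs.length ∧ cs.length ≤ ts.length + m) := by
        constructor
        · rintro ⟨a, b, c⟩
          refine ⟨a, b, ?_⟩
          rcases Nat.lt_or_ge (ts.length + m) cs.length with hlt | hge
          · exfalso
            have hfm : cs.length - ts.length = 1 + m := by omega
            exact hp (by rw [← hfm]; exact a)
          · omega
        · rintro ⟨a, b, c⟩; exact ⟨a, b, by omega⟩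
      simp only [h1, Bool.false_eq_true, if_false, Nat.add_zero, hiff]

theorem pvCnt_getD (L : List String) (v : String) :
    (L.foldl (fun d s => d.insert s (d.getD s 0 + 1)) PySem.Dict.empty).getD v 0
      = (L.count v : Int) := by
  rw [PySem.Dict.getD_foldl_insert_add_one, PySem.Dict.getD_empty, zero_add]

theorem pvCountB_eq (ion : String) (L : List String)
    (h : L.Pairwise (fun a b => b.length ≤ a.length)) (s : String) :
    pvCountB ion (L.foldl (fun d s => d.insert s (d.getD s 0 + 1)) PySem.Dict.empty) s
      = pvCountA ion L s := by
  rw [pvCountA_formula ion L h s, pvCountB]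
  have hcnt : ∀ v, (L.foldl (fun d s => d.insert s (d.getD s 0 + 1)) PySem.Dict.empty).getD v 0
      = (L.count v : Int) := pvCnt_getD L
  rw [hcnt s]
  have hlen : PySem.Str.len s = ((s.length : Nat) : Int) := by
    simp [PySem.Str.len]
  have htri : PySem.Int.floordiv ((L.count s : Int) * ((L.count s : Int) - 1)) 2
      = pvTri (L.count s) := pvTri_floordiv (L.count s)
  rw [htri]
  congr 1
  congr 1
  cases hb : (ion == "b") with
  | true =>
    simp only [if_true, hlen, PySem.List.pyRange_zero_nat, List.map_map]
    have hmap : ∀ k : Nat, (Function.comp (fun d => (L.foldl (fun d s => d.insert s (d.getD s 0 + 1)) PySem.Dict.empty).getD (PySem.Str.slice s none (some d)) 0) (fun k : Nat => (k : Int))) k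
        = (L.count (PySem.Str.slice s none (some (k : Int))) : Int) := by
      intro k; simp [Function.comp, hcnt]
    rw [List.map_congr_left (fun k _ => hmap k)]
    rw [pvSum_counts (fun k => PySem.Str.slice s none (some (k : Int))) s.length (pvSM ion s)]
    intro t
    have hfun : (fun k : Nat => decide (t = PySem.Str.slice s none (some (k : Int))))
        = fun k : Nat => decide (t.toList = s.toList.take k) := by
      funext k
      simp only [decide_eq_decide]
      rw [String.ext_iff, PySem.Str.slice]
      simp only [PySem.Chars.slice_eq_listSlice, PySem.List.slice_to_natCast, String.toList_ofList]
    rw [hfun, pvH1 s.toList t.toList s.length (by simp)]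
    have hsm : pvSM ion s t = true ↔ (t.toList = s.toList.take t.toList.length ∧ t.toList.length < s.length) := by
      rw [pvSM, Bool.and_eq_true, pvMatch_b ion s t hb]
      simp
    by_cases hG : pvSM ion s t = true
    · rw [if_pos (hsm.mp hG), if_pos hG]
    · rw [if_neg (fun hc => hG (hsm.mpr hc)), if_neg hG]
  | false =>
    simp only [Bool.false_eq_true, if_false, hlen, PySem.List.pyRange_one, List.map_map]
    have hto : (((s.length : Nat) : Int) - 1).toNat = s.length - 1 := by omega
    rw [hto]
    have hmap : ∀ k : Nat, (Function.comp (fun d => (L.foldl (fun d s => d.insert s (d.getD s 0 + 1)) PySem.Dict.empty).getD (PySem.Str.slice s (some d) none) 0) (fun k : Nat => (1 : Int) + (k : Int))) k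
        = (L.count (PySem.Str.slice s (some ((1 + k : Nat) : Int)) none) : Int) := by
      intro k
      have hcast : (1 : Int) + (k : Int) = ((1 + k : Nat) : Int) := by push_cast; ring
      simp only [Function.comp, hcast, hcnt]
    rw [List.map_congr_left (fun k _ => hmap k)]
    rw [pvSum_counts (fun k => PySem.Str.slice s (some ((1 + k : Nat) : Int)) none) (s.length - 1) (pvSM ion s)]
    intro t
    have hfun : (fun k : Nat => decide (t = PySem.Str.slice s (some ((1 + k : Nat) : Int)) none))
        = fun k : Nat => decide (t.toList = s.toList.drop (1 + k)) := by
      funext k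
      simp only [decide_eq_decide]
      rw [String.ext_iff, PySem.Str.slice]
      simp only [PySem.Chars.slice_eq_listSlice, PySem.List.slice_from_natCast, String.toList_ofList]
    rw [hfun, pvH2 s.toList t.toList (s.length - 1) (by simp)]
    have hsm : pvSM ion s t = true ↔
        (t.toList = s.toList.drop (s.toList.length - t.toList.length) ∧ t.toList.length < s.toList.length
          ∧ s.toList.length ≤ t.toList.length + (s.length - 1)) := by
      simp only [String.length_toList]
      constructor
      · intro hG
        rw [pvSM, Bool.and_eq_true] at hG
        obtain ⟨hm, hlt⟩ := hG
        have hlt' : t.length < s.length := by simpa using hlt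
        have hpos : 0 < t.length := by
          by_contra h0
          have h0' : t.length = 0 := by omega
          rw [pvMatch_y_nil ion s t hb h0'] at hm
          have hts : t = s := by simpa using hm
          rw [hts] at hlt'
          omega
        rw [pvMatch_y_pos ion s t hb hpos] at hm
        exact ⟨by simpa using hm, hlt', by omega⟩
      · rintro ⟨he, hlt, hge⟩
        have hpos : 0 < t.length := by omega
        rw [pvSM, Bool.and_eq_true, pvMatch_y_pos ion s t hb hpos]
        exact ⟨by simpa using he, by simpa using hlt⟩
    by_cases hG : pvSM ion s t = true
    · rw [if_pos (hsm.mp hG), if_pos hG]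
    · rw [if_neg (fun hc => hG (hsm.mpr hc)), if_neg hG]

theorem pvFoldB_eq (c : String → Int) : ∀ (L : List String) (seen : PySem.Set String)
    (best : Option (Int × String)),
    (L.foldl (fun (st : PySem.Set String × Option (Int × String)) s =>
      if PySem.Set.contains st.1 s then st
      else (PySem.Set.add st.1 s,
        match st.2 with
        | none => some (c s, s)
        | some b => if b.1 < c s then some (c s, s) else some b)) (seen, best)).2
    = ((PySem.Set.ofList L).filter (fun s => !(PySem.Set.contains seen s))).foldl
        (fun b s => match b with
          | none => some (c s, s)
          | some b => if b.1 < c s then some (c s, s) else some b) best := by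
  intro L
  induction L with
  | nil => intro seen best; rfl
  | cons e rest ih =>
    intro seen best
    rw [List.foldl_cons, PySem.Set.ofList_cons, List.filter_cons]
    cases hc : PySem.Set.contains seen e with
    | true =>
      simp only [if_true, Bool.not_true, Bool.false_eq_true, if_false]
      rw [ih seen best]
      congr 1
      rw [PySem.Set.discard, List.filter_filter]
      refine List.filter_congr (fun y _ => ?_)
      by_cases hy : y = e
      · subst hy
        have hy' : y ∈ seen := by simpa using hc
        simp [hy']
      · simp [hy]
    | false =>
      simp only [Bool.false_eq_true, if_false, Bool.not_false, if_true]
      rw [ih (PySem.Set.add seen e) _, List.foldl_cons]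
      congr 1
      rw [PySem.Set.discard, List.filter_filter]
      refine List.filter_congr (fun y _ => ?_)
      by_cases hy : y = e
      · subst hy
        simp
      · have hadd : PySem.Set.contains (PySem.Set.add seen e) y = PySem.Set.contains seen y := by
          cases hs : PySem.Set.contains seen y with
          | true => simpa [PySem.Set.mem_add] using Or.inl (by simpa using hs : y ∈ seen)
          | false =>
            simp only [PySem.Set.contains_eq_listContains, List.contains_eq_mem] at hs ⊢
            simp [PySem.Set.mem_add, hy]
            simpa using hs
        simp [hy]

theorem pvFinal_aux (c : String → Int) : ∀ (ds : List String)
    (accA : Option (String × Int)) (accB : Option (Int × String)),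
    ((accA = none ∧ (accB = none ∨ ∃ b, accB = some b ∧ b.1 = c b.2 ∧ b.1 ≤ 0)) ∨
      (∃ s0, accA = some (s0, c s0) ∧ accB = some (c s0, s0) ∧ 0 < c s0)) →
    (match ds.foldl (fun acc s => if 0 < c s then
        (match acc with
          | none => some (s, c s)
          | some m => if m.2 < c s then some (s, c s) else some m) else acc) accA with
      | none => none
      | some kv => if kv.2 > 1 then some kv.1 else none)
    = (match ds.foldl (fun b s => match b with
          | none => some (c s, s)
          | some b => if b.1 < c s then some (c s, s) else some b) accB with
      | none => none
      | some b => if 1 < b.1 then some b.2 else none) := by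
  intro ds
  induction ds with
  | nil =>
    intro accA accB hR
    rcases hR with ⟨hA, hB⟩ | ⟨s0, hA, hB, hpos⟩
    · rcases hB with hB | ⟨b, hB, hbc, hble⟩
      · rw [hA, hB]
        simp only [List.foldl_nil]
      · rw [hA, hB]
        simp only [List.foldl_nil]
        rw [if_neg (by omega)]
    · rw [hA, hB]
      simp only [List.foldl_nil]
  | cons s rest ih =>
    intro accA accB hR
    rw [List.foldl_cons, List.foldl_cons]
    apply ih
    rcases hR with ⟨hA, hB⟩ | ⟨s0, hA, hB, hpos⟩
    · rcases hB with hB | ⟨b, hB, hbc, hble⟩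
      · rw [hA, hB]
        by_cases hpos : 0 < c s
        · right; exact ⟨s, by rw [if_pos hpos], rfl, hpos⟩

        · left
          exact ⟨by rw [if_neg hpos], Or.inr ⟨(c s, s), rfl, rfl, by omega⟩⟩
      · rw [hA, hB]
        by_cases hpos : 0 < c s
        · right
          refine ⟨s, by rw [if_pos hpos], ?_, hpos⟩
          simp only []
          rw [if_pos (by omega : b.1 < c s)]
        · left
          refine ⟨by rw [if_neg hpos], Or.inr ?_⟩
          by_cases hlt : b.1 < c s
          · exact ⟨(c s, s), by simp only []; rw [if_pos hlt], rfl, by omega⟩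
          · exact ⟨b, by simp only []; rw [if_neg hlt], hbc, hble⟩
    · rw [hA, hB]
      by_cases hq : 0 < c s
      · rw [if_pos hq]
        by_cases hlt : c s0 < c s
        · right; exact ⟨s, by simp [hlt], by simp [hlt], hq⟩
        · right; exact ⟨s0, by simp [hlt], by simp [hlt], hpos⟩
      · rw [if_neg hq]
        right
        exact ⟨s0, rfl, by simp [show ¬ c s0 < c s by omega], hpos⟩

theorem pvFinal_eq (ds : List String) (c : String → Int) :
    (match PySem.List.max?
        ((ds.filter (fun s => decide (0 < c s))).map (fun k => (k, c k))) (fun p => p.2) with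
      | none => none
      | some kv => if kv.2 > 1 then some kv.1 else none)
    = (match ds.foldl (fun b s => match b with
          | none => some (c s, s)
          | some b => if b.1 < c s then some (c s, s) else some b) none with
      | none => none
      | some b => if 1 < b.1 then some b.2 else none) := by
  have hmax : PySem.List.max?
      ((ds.filter (fun s => decide (0 < c s))).map (fun k => (k, c k))) (fun p => p.2)
      = ds.foldl (fun acc s => if 0 < c s then
        (match acc with
          | none => some (s, c s)
          | some m => if m.2 < c s then some (s, c s) else some m) else acc) none := by
    rw [PySem.List.max?, List.foldl_map, ← PySem.List.foldl_ite_eq_foldl_filter]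
    refine PySem.List.foldl_congr_mem _ _ _ _ ?_
    intro acc x _
    by_cases hq : 0 < c x
    · simp only [if_pos hq]
      cases acc <;> rfl
    · simp only [if_neg hq]
  rw [hmax]
  exact pvFinal_aux c ds none none (Or.inl ⟨rfl, Or.inl rfl⟩)

-- ===== VERDICT (by name: the statement is the Claim_ definition above) =====
theorem overlap_assembler_spec : Claim_equal_overlap_assembler := by
  intro l ion _
  unfold Spec_overlap_assembler
  unfold overlap_assembler overlap_assembler_alt
  simp only []
  set L := PySem.List.sorted l (fun s => PySem.Str.len s) true with hLdef
  have hpw : L.Pairwise (fun a b => b.length ≤ a.length) := by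
    have h0 := PySem.List.sorted_pairwise_rev (xs := l) (key := fun s => PySem.Str.len s)
    rw [← hLdef] at h0
    refine h0.imp ?_
    intro a b hab
    simpa [PySem.Str.len] using hab
  have hnd : (pvPairs ion L PySem.Dict.empty).keys.Nodup :=
    pvPairs_nodup_keys ion L _ (by simp [PySem.Dict.keys_empty])
  have hkeys : (pvPairs ion L PySem.Dict.empty).keys
      = (PySem.Set.ofList L).filter (fun s => decide (0 < pvCountA ion L s)) := by
    rw [pvPairs_keys, pvKeysA_eq]
    simp [PySem.Dict.keys_empty]
  have hitems : (pvPairs ion L PySem.Dict.empty).items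
      = ((PySem.Set.ofList L).filter (fun s => decide (0 < pvCountA ion L s))).map
          (fun k => (k, pvCountA ion L k)) := by
    rw [PySem.Dict.items_eq_map_keys _ hnd 0, hkeys]
    refine List.map_congr_left ?_
    intro k _
    rw [pvPairs_getD, PySem.Dict.getD_empty, zero_add]
  rw [hitems]
  rw [pvFoldB_eq (fun s => pvCountB ion (L.foldl (fun d s => d.insert s (d.getD s 0 + 1)) PySem.Dict.empty) s) L PySem.Set.empty none]
  have hfe : ((PySem.Set.ofList L).filter (fun s => !(PySem.Set.contains PySem.Set.empty s)))
      = PySem.Set.ofList L := by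
    refine List.filter_eq_self.mpr ?_
    intro a _
    rfl
  rw [hfe]
  have hfold : (PySem.Set.ofList L).foldl
      (fun b s => match b with
        | none => some (pvCountB ion (L.foldl (fun d s => d.insert s (d.getD s 0 + 1)) PySem.Dict.empty) s, s)
        | some b => if b.1 < pvCountB ion (L.foldl (fun d s => d.insert s (d.getD s 0 + 1)) PySem.Dict.empty) s
            then some (pvCountB ion (L.foldl (fun d s => d.insert s (d.getD s 0 + 1)) PySem.Dict.empty) s, s) else some b) none
      = (PySem.Set.ofList L).foldl
      (fun b s => match b with
        | none => some (pvCountA ion L s, s)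
        | some b => if b.1 < pvCountA ion L s then some (pvCountA ion L s, s) else some b) none := by
    refine PySem.List.foldl_congr_mem _ _ _ _ ?_
    intro acc x _
    rw [pvCountB_eq ion L hpw x]
  rw [hfold]
  exact pvFinal_eq (PySem.Set.ofList L) (pvCountA ion L)
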